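-- pv_equiv track=rewrite | github.com/hannapcf/PYTHON-PROJECTS | bomberman.py | percorrendo_em_cruz
-- ===== SOURCE A (Python) =====
-- def calcula_soma(matriz, linha, coluna, m):
--     i_min = max(linha-m, 0)
--     i_max = min(linha+m+1, len(matriz))
--     soma = 0
--     for i in range(i_min, i_max):
--         soma += matriz[i][coluna]
--
--     j_min = max(coluna - m, 0)
--     j_max = min(coluna + m + 1, len(matriz))
--     for j in range(j_min, j_max):
--         soma += matriz[linha][j]
--
--     soma -= matriz[linha][coluna]
--     return soma
--
-- def percorrendo_em_cruz(n, m, matriz):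
--     maior = -1
--     maior_linha = -1
--     maior_coluna = -1
--     for i in range(len(matriz)):
--         for j in range(len(matriz[i])):
--             soma = calcula_soma(matriz, i, j, m)
--             if soma > maior:
--                 maior = soma
--                 maior_linha = i
--                 maior_coluna = j
--
--     return (maior, maior_linha, maior_coluna)
-- ===== SOURCE B (Python) =====
-- def _prefix(row):
--     pre = [0]
--     s = 0
--     for v in row:
--         s += v
--         pre.append(s)
--     return pre
--
-- def percorrendo_em_cruz(n, m, matriz):
--     N = len(matriz)
--     W = 0
--     for row in matriz:
--         if len(row) > W:
--             W = len(row)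
--     colpre = [_prefix([row[j] if j < len(row) else 0 for row in matriz]) for j in range(W)]
--     rowpre = [_prefix(row) for row in matriz]
--     maior, maior_linha, maior_coluna = -1, -1, -1
--     for i in range(N):
--         for j in range(len(matriz[i])):
--             i0, i1 = max(i - m, 0), min(i + m + 1, N)
--             j0, j1 = max(j - m, 0), min(j + m + 1, N)
--             cs = colpre[j][i1] - colpre[j][i0] if i0 < i1 else 0
--             rs = rowpre[i][j1] - rowpre[i][j0] if j0 < j1 else 0
--             soma = cs + rs - matriz[i][j]
--             if soma > maior:
--                 maior, maior_linha, maior_coluna = soma, i, j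
--     return (maior, maior_linha, maior_coluna)
-- ===== Notes on version B (the rewrite author's own statement) =====
-- stated objective: faster
-- what changed: B precomputes per-row and per-column prefix-sum tables once and reads each cross-window sum as two O(1) prefix differences, instead of A's rescan of up to 2m+1 cells per matrix cell.
import Mathlib
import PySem

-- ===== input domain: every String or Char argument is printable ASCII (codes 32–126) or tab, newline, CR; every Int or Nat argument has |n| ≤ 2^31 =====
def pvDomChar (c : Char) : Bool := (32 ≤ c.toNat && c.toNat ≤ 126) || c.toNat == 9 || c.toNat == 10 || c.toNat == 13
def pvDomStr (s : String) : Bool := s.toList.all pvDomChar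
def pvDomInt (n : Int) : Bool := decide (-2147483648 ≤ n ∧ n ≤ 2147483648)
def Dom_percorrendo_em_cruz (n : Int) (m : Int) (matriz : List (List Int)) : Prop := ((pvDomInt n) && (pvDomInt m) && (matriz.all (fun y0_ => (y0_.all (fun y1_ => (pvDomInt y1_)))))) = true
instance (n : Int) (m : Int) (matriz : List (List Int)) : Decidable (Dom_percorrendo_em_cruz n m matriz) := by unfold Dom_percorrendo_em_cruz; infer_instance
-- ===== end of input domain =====

-- B replaces A's per-cell rescan of the cross window by row/column prefix-sum tables,
-- so each cross-window sum is two O(1) prefix differences instead of a loop over the window.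

-- ===== PORT A =====
-- literal port of calcula_soma; pyGetD is exact here: under Pre_ every index Python reads is in range
def calcula_soma (matriz : List (List Int)) (linha coluna m : Int) : Int :=
  let i_min := max (linha - m) 0
  let i_max := min (linha + m + 1) (matriz.length : Int)
  let soma := (PySem.List.pyRange i_min i_max 1).foldl
      (fun s i => s + PySem.List.pyGetD (PySem.List.pyGetD matriz i []) coluna 0) 0
  let j_min := max (coluna - m) 0
  let j_max := min (coluna + m + 1) (matriz.length : Int)
  let soma := (PySem.List.pyRange j_min j_max 1).foldl
      (fun s j => s + PySem.List.pyGetD (PySem.List.pyGetD matriz linha []) j 0) soma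
  soma - PySem.List.pyGetD (PySem.List.pyGetD matriz linha []) coluna 0

def percorrendo_em_cruz (n : Int) (m : Int) (matriz : List (List Int)) : Int × Int × Int :=
  (PySem.List.pyRange 0 (matriz.length : Int) 1).foldl (fun st i =>
    (PySem.List.pyRange 0 ((PySem.List.pyGetD matriz i []).length : Int) 1).foldl (fun st j =>
      let soma := calcula_soma matriz i j m
      if soma > st.1 then (soma, i, j) else st) st) (-1, -1, -1)

-- ===== PORT B =====
-- port of _prefix: pre = [0]; s = 0; for v in row: s += v; pre.append(s)
def pvPrefix (row : List Int) : List Int :=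
  (row.foldl (fun (p : List Int × Int) v => (p.1 ++ [p.2 + v], p.2 + v)) ([0], 0)).1

def percorrendo_em_cruz_alt (n : Int) (m : Int) (matriz : List (List Int)) : Int × Int × Int :=
  let N := matriz.length
  -- W = 0; for row in matriz: if len(row) > W: W = len(row)
  let W : Int := matriz.foldl (fun w row => if (row.length : Int) > w then (row.length : Int) else w) 0
  -- colpre = [_prefix([row[j] if j < len(row) else 0 for row in matriz]) for j in range(W)]
  let colpre := (PySem.List.pyRange 0 W 1).map (fun j =>
      pvPrefix (matriz.map (fun row => if j < (row.length : Int) then PySem.List.pyGetD row j 0 else 0)))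
  let rowpre := matriz.map pvPrefix
  (PySem.List.pyRange 0 (N : Int) 1).foldl (fun st i =>
    (PySem.List.pyRange 0 ((PySem.List.pyGetD matriz i []).length : Int) 1).foldl (fun st j =>
      let i0 := max (i - m) 0
      let i1 := min (i + m + 1) (N : Int)
      let j0 := max (j - m) 0
      let j1 := min (j + m + 1) (N : Int)
      let cs := if i0 < i1 then
          PySem.List.pyGetD (PySem.List.pyGetD colpre j []) i1 0
            - PySem.List.pyGetD (PySem.List.pyGetD colpre j []) i0 0 else 0
      let rs := if j0 < j1 then
          PySem.List.pyGetD (PySem.List.pyGetD rowpre i []) j1 0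
            - PySem.List.pyGetD (PySem.List.pyGetD rowpre i []) j0 0 else 0
      let soma := cs + rs - PySem.List.pyGetD (PySem.List.pyGetD matriz i []) j 0
      if soma > st.1 then (soma, i, j) else st) st) (-1, -1, -1)

-- ===== PRECONDITION & SPEC =====
-- Pre_ is exactly the set of inputs on which the Python A returns normally: for every cell (i, j)
-- every row the vertical window reads must be long enough (else matriz[k][j] raises IndexError),
-- and the horizontal window — which A clamps by the row COUNT — must fit inside row i
-- (else matriz[i][j'] raises IndexError).
def Pre_percorrendo_em_cruz (n : Int) (m : Int) (matriz : List (List Int)) : Prop :=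
  ∀ i < matriz.length, ∀ j < (matriz.getD i []).length,
    (∀ k < matriz.length,
        (max ((i : Int) - m) 0 ≤ (k : Int) ∧ (k : Int) < min ((i : Int) + m + 1) (matriz.length : Int)) →
        j < (matriz.getD k []).length)
    ∧ (max ((j : Int) - m) 0 < min ((j : Int) + m + 1) (matriz.length : Int) →
        min ((j : Int) + m + 1) (matriz.length : Int) ≤ ((matriz.getD i []).length : Int))
instance (n : Int) (m : Int) (matriz : List (List Int)) : Decidable (Pre_percorrendo_em_cruz n m matriz) := by unfold Pre_percorrendo_em_cruz; infer_instance

def pvWitness_percorrendo_em_cruz : Int × Int × List (List Int) := (2, 1, [[1, 2], [3, 4]])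

def Spec_percorrendo_em_cruz (n : Int) (m : Int) (matriz : List (List Int)) (out : Int × Int × Int) : Prop := out = percorrendo_em_cruz_alt n m matriz
instance (n : Int) (m : Int) (matriz : List (List Int)) (out : Int × Int × Int) : Decidable (Spec_percorrendo_em_cruz n m matriz out) := by unfold Spec_percorrendo_em_cruz; infer_instance

-- ===== CLAIM (what is proved, stated in full; the proofs are below) =====
def Claim_equal_percorrendo_em_cruz : Prop := ∀ (n : Int) (m : Int) (matriz : List (List Int)), Dom_percorrendo_em_cruz n m matriz → Pre_percorrendo_em_cruz n m matriz → Spec_percorrendo_em_cruz n m matriz (percorrendo_em_cruz n m matriz)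

-- ===== LEMMAS AND PROOFS =====

-- sum of l.getD over an index range, as a difference of prefix sums
lemma pvSumRangeGetD (l : List Int) : ∀ (n a : Nat), a + n ≤ l.length →
    ((List.range n).map (fun k => l.getD (a + k) 0)).sum
      = (l.take (a + n)).sum - (l.take a).sum := by
  intro n
  induction n with
  | zero => intro a _; simp
  | succ n ih =>
      intro a h
      rw [List.range_succ]
      simp only [List.map_append, List.map_cons, List.map_nil, List.sum_append, List.sum_cons, List.sum_nil]
      rw [ih a (by omega)]
      have h1 : a + n < l.length := by omega
      have : (l.take (a + (n + 1))).sum = (l.take (a + n)).sum + l.getD (a + n) 0 := by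
        rw [show a + (n + 1) = (a + n) + 1 from rfl, List.take_add_one]
        simp [List.getD, h1]
      omega

lemma pvRangeSum (l : List Int) (u v : Nat) (hu : u ≤ v) (hv : v ≤ l.length) :
    ((PySem.List.pyRange (u : Int) (v : Int) 1).map (fun i => PySem.List.pyGetD l i 0)).sum
      = (l.take v).sum - (l.take u).sum := by
  rw [PySem.List.pyRange_one, show (((v : Int) - (u : Int)).toNat) = v - u by omega, List.map_map]
  have h := pvSumRangeGetD l (v - u) u (by omega)
  rw [show u + (v - u) = v by omega] at h
  rw [← h]
  apply congrArg List.sum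
  apply List.map_congr_left
  intro k _
  simp only [Function.comp]
  rw [show (u : Int) + (k : Int) = ((u + k : Nat) : Int) by push_cast; ring,
      PySem.List.pyGetD_natCast]

lemma pvPrefix_aux : ∀ (row : List Int) (p : List Int) (s : Int),
    (row.foldl (fun (p : List Int × Int) v => (p.1 ++ [p.2 + v], p.2 + v)) (p, s)).1
      = p ++ (List.range row.length).map (fun k => s + (row.take (k + 1)).sum) := by
  intro row
  induction row with
  | nil => intro p s; simp
  | cons v row ih =>
      intro p s
      simp only [List.foldl_cons]
      rw [ih (p ++ [s + v]) (s + v)]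
      simp only [List.length_cons, List.range_succ_eq_map, List.map_cons, List.map_map]
      simp [Function.comp, List.take_succ_cons, add_assoc]

lemma pvPrefix_eq (row : List Int) :
    pvPrefix row = (List.range (row.length + 1)).map (fun k => (row.take k).sum) := by
  unfold pvPrefix
  rw [pvPrefix_aux row [0] 0]
  simp only [List.range_succ_eq_map, List.map_cons, List.map_map]
  simp [Function.comp]

lemma pvPrefix_getD (row : List Int) (k : Nat) (hk : k ≤ row.length) :
    (pvPrefix row).getD k 0 = (row.take k).sum := by
  rw [pvPrefix_eq]
  rw [List.getD_eq_getElem _ _ (by simpa using Nat.lt_succ_of_le hk)]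
  simp

-- A's vertical-window loop sums the 0-padded column b, so it is a prefix difference of that column
lemma pvColRange (matriz : List (List Int)) (b : Nat)
    (u v : Nat) (hu : u ≤ v) (hv : v ≤ matriz.length) :
    ((PySem.List.pyRange (u : Int) (v : Int) 1).map
        (fun i => PySem.List.pyGetD (PySem.List.pyGetD matriz i []) (b : Int) 0)).sum
      = ((matriz.map (fun r => r.getD b 0)).take v).sum
        - ((matriz.map (fun r => r.getD b 0)).take u).sum := by
  rw [← pvRangeSum (matriz.map (fun r => r.getD b 0)) u v hu (by simpa using hv)]
  apply congrArg List.sum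
  apply List.map_congr_left
  intro x hx
  obtain ⟨hx0, hx1⟩ := (PySem.List.mem_pyRange_one).1 hx
  have hc : x.toNat < matriz.length := by omega
  rw [show x = ((x.toNat : Nat) : Int) by omega]
  rw [PySem.List.pyGetD_natCast, PySem.List.pyGetD_natCast, PySem.List.pyGetD_natCast]
  have h1 : (matriz.map (fun r => r.getD b 0)).getD x.toNat 0 = (matriz.getD x.toNat []).getD b 0 := by
    rw [List.getD_eq_getElem _ _ (by simpa using hc), List.getElem_map,
        List.getD_eq_getElem matriz _ hc]
  rw [h1]

-- B's running maximum W bounds every row length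
lemma pvWfold (matriz : List (List Int)) : ∀ (w : Int),
    w ≤ matriz.foldl (fun w row => if (row.length : Int) > w then (row.length : Int) else w) w
    ∧ ∀ row ∈ matriz, (row.length : Int)
        ≤ matriz.foldl (fun w row => if (row.length : Int) > w then (row.length : Int) else w) w := by
  induction matriz with
  | nil => intro w; simp
  | cons r rest ih =>
      intro w
      simp only [List.foldl_cons]
      constructor
      · rcases le_or_gt ((r.length : Int)) w with h | h
        · rw [if_neg (by omega)]; exact (ih w).1
        · rw [if_pos (by omega)]
          exact le_trans (le_of_lt h) (ih (r.length : Int)).1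
      · intro row hrow
        rcases List.mem_cons.1 hrow with rfl | hmem
        · rcases le_or_gt ((row.length : Int)) w with h | h
          · rw [if_neg (by omega)]; exact le_trans h (ih w).1
          · rw [if_pos (by omega)]; exact (ih (row.length : Int)).1
        · rcases le_or_gt ((r.length : Int)) w with h | h
          · rw [if_neg (by omega)]; exact (ih w).2 row hmem
          · rw [if_pos (by omega)]; exact (ih (r.length : Int)).2 row hmem

lemma pvCell (matriz : List (List Int)) (m : Int) (a b : Nat)
    (ha : a < matriz.length) (hb : b < (matriz.getD a []).length)
    (hwin : max ((b : Int) - m) 0 < min ((b : Int) + m + 1) (matriz.length : Int) →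
        min ((b : Int) + m + 1) (matriz.length : Int) ≤ ((matriz.getD a []).length : Int)) :
    calcula_soma matriz (a : Int) (b : Int) m =
      (if max ((a : Int) - m) 0 < min ((a : Int) + m + 1) (matriz.length : Int) then
          PySem.List.pyGetD (PySem.List.pyGetD
            ((PySem.List.pyRange 0 (matriz.foldl (fun w row => if (row.length : Int) > w then (row.length : Int) else w) 0) 1).map (fun j =>
              pvPrefix (matriz.map (fun row => if j < (row.length : Int) then PySem.List.pyGetD row j 0 else 0))))
            (b : Int) []) (min ((a : Int) + m + 1) (matriz.length : Int)) 0
          - PySem.List.pyGetD (PySem.List.pyGetD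
            ((PySem.List.pyRange 0 (matriz.foldl (fun w row => if (row.length : Int) > w then (row.length : Int) else w) 0) 1).map (fun j =>
              pvPrefix (matriz.map (fun row => if j < (row.length : Int) then PySem.List.pyGetD row j 0 else 0))))
            (b : Int) []) (max ((a : Int) - m) 0) 0
        else 0)
      + (if max ((b : Int) - m) 0 < min ((b : Int) + m + 1) (matriz.length : Int) then
          PySem.List.pyGetD (PySem.List.pyGetD (matriz.map pvPrefix) (a : Int) []) (min ((b : Int) + m + 1) (matriz.length : Int)) 0
          - PySem.List.pyGetD (PySem.List.pyGetD (matriz.map pvPrefix) (a : Int) []) (max ((b : Int) - m) 0) 0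
        else 0)
      - PySem.List.pyGetD (PySem.List.pyGetD matriz (a : Int) []) (b : Int) 0 := by
  have hrow : PySem.List.pyGetD matriz ((a : Nat) : Int) [] = matriz.getD a [] := by
    rw [PySem.List.pyGetD_natCast]
  have hcolmap : PySem.List.pyGetD
      ((PySem.List.pyRange 0 (matriz.foldl (fun w row => if (row.length : Int) > w then (row.length : Int) else w) 0) 1).map (fun j =>
        pvPrefix (matriz.map (fun row => if j < (row.length : Int) then PySem.List.pyGetD row j 0 else 0))))
      (b : Int) []
      = pvPrefix (matriz.map (fun r => r.getD b 0)) := by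
    have hW : ((matriz.getD a []).length : Int)
        ≤ matriz.foldl (fun w row => if (row.length : Int) > w then (row.length : Int) else w) 0 := by
      have := (pvWfold matriz 0).2 (matriz.getD a []) (by
        rw [List.getD_eq_getElem matriz _ ha]; exact List.getElem_mem ha)
      exact this
    rw [PySem.List.pyGetD_map_pyRange_of_nonneg _ _ _ _ (by omega) (by
      have : (b : Int) < ((matriz.getD a []).length : Int) := by exact_mod_cast hb
      omega)]
    apply congrArg pvPrefix
    apply List.map_congr_left
    intro row _
    by_cases hlt : (b : Int) < (row.length : Int)
    · rw [if_pos hlt, PySem.List.pyGetD_natCast]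
    · rw [if_neg hlt, List.getD_eq_default]
      omega
  unfold calcula_soma
  simp only []
  rw [PySem.List.foldl_add, PySem.List.foldl_add, zero_add]
  have hcsum : ((PySem.List.pyRange (max ((a : Int) - m) 0) (min ((a : Int) + m + 1) (matriz.length : Int)) 1).map
        (fun i' => PySem.List.pyGetD (PySem.List.pyGetD matriz i' []) (b : Int) 0)).sum
      = (if max ((a : Int) - m) 0 < min ((a : Int) + m + 1) (matriz.length : Int) then
          PySem.List.pyGetD (pvPrefix (matriz.map (fun r => r.getD b 0))) (min ((a : Int) + m + 1) (matriz.length : Int)) 0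
          - PySem.List.pyGetD (pvPrefix (matriz.map (fun r => r.getD b 0))) (max ((a : Int) - m) 0) 0
        else 0) := by
    by_cases hc : max ((a : Int) - m) 0 < min ((a : Int) + m + 1) (matriz.length : Int)
    · rw [if_pos hc]
      set u := (max ((a : Int) - m) 0).toNat with hudef
      set v := (min ((a : Int) + m + 1) (matriz.length : Int)).toNat with hvdef
      have hui : max ((a : Int) - m) 0 = ((u : Nat) : Int) := by omega
      have hvi : min ((a : Int) + m + 1) (matriz.length : Int) = ((v : Nat) : Int) := by
        rw [hvdef]; omega
      have hvt : v ≤ matriz.length := by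
        have : min ((a : Int) + m + 1) (matriz.length : Int) ≤ (matriz.length : Int) := min_le_right _ _
        omega
      rw [hui, hvi, pvColRange matriz b u v (by omega) hvt]
      rw [PySem.List.pyGetD_natCast, PySem.List.pyGetD_natCast]
      rw [pvPrefix_getD _ v (by simpa using hvt), pvPrefix_getD _ u (by simp; omega)]
    · rw [if_neg hc, PySem.List.pyRange_one_eq_nil (by omega)]
      simp
  have hrsum : ((PySem.List.pyRange (max ((b : Int) - m) 0) (min ((b : Int) + m + 1) (matriz.length : Int)) 1).map
        (fun j' => PySem.List.pyGetD (PySem.List.pyGetD matriz ((a : Nat) : Int) []) j' 0)).sum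
      = (if max ((b : Int) - m) 0 < min ((b : Int) + m + 1) (matriz.length : Int) then
          PySem.List.pyGetD (PySem.List.pyGetD (matriz.map pvPrefix) (a : Int) []) (min ((b : Int) + m + 1) (matriz.length : Int)) 0
          - PySem.List.pyGetD (PySem.List.pyGetD (matriz.map pvPrefix) (a : Int) []) (max ((b : Int) - m) 0) 0
        else 0) := by
    have hpremap : PySem.List.pyGetD (matriz.map pvPrefix) ((a : Nat) : Int) [] = pvPrefix (matriz.getD a []) := by
      rw [PySem.List.pyGetD_natCast,
          List.getD_eq_getElem _ _ (by simpa using ha), List.getElem_map,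
          List.getD_eq_getElem matriz _ ha]
    by_cases hc : max ((b : Int) - m) 0 < min ((b : Int) + m + 1) (matriz.length : Int)
    · rw [if_pos hc]
      have hfit := hwin hc
      set u := (max ((b : Int) - m) 0).toNat with hudef
      set v := (min ((b : Int) + m + 1) (matriz.length : Int)).toNat with hvdef
      have hui : max ((b : Int) - m) 0 = ((u : Nat) : Int) := by omega
      have hvi : min ((b : Int) + m + 1) (matriz.length : Int) = ((v : Nat) : Int) := by
        rw [hvdef]; omega
      have hvt : v ≤ (matriz.getD a []).length := by omega
      rw [hui, hvi, hrow, hpremap]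
      rw [pvRangeSum (matriz.getD a []) u v (by omega) hvt]
      rw [PySem.List.pyGetD_natCast, PySem.List.pyGetD_natCast]
      rw [pvPrefix_getD _ v hvt, pvPrefix_getD _ u (by omega)]
    · rw [if_neg hc, PySem.List.pyRange_one_eq_nil (by omega)]
      simp
  rw [hcsum, hrsum, hcolmap, hrow]

-- ===== VERDICT (by name: the statement is the Claim_ definition above) =====
theorem percorrendo_em_cruz_spec : Claim_equal_percorrendo_em_cruz := by
  intro n m matriz _ hpre
  unfold Spec_percorrendo_em_cruz percorrendo_em_cruz percorrendo_em_cruz_alt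
  simp only []
  apply PySem.List.foldl_congr_mem
  intro st i hi
  obtain ⟨hi0, hi1⟩ := PySem.List.mem_pyRange_one.1 hi
  apply PySem.List.foldl_congr_mem
  intro st' j hj
  obtain ⟨hj0, hj1⟩ := PySem.List.mem_pyRange_one.1 hj
  have ha : i.toNat < matriz.length := by omega
  have hrowi : PySem.List.pyGetD matriz i [] = matriz.getD i.toNat [] := by
    conv_lhs => rw [show i = ((i.toNat : Nat) : Int) by omega]
    rw [PySem.List.pyGetD_natCast]
  rw [hrowi] at hj1
  have hb : j.toNat < (matriz.getD i.toNat []).length := by omega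
  have hwin := (hpre i.toNat ha j.toNat hb).2
  rw [show i = ((i.toNat : Nat) : Int) by omega, show j = ((j.toNat : Nat) : Int) by omega]
  rw [pvCell matriz m i.toNat j.toNat ha hb hwin]
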